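-- pv_equiv track=rewrite | github.com/rajashekharreddy/second_repo | practice/3_tests/7_string_manipulation.py | string_manipulation
-- ===== SOURCE A (Python) =====
-- def string_manipulation(input1):
--
-- 	output = ""
-- 	i = 0
-- 	while i <= (len(input1)-1):
--
-- 		if input1[i] == "c":
--
-- 			if input1[i+1:i+3] == "ie" or input1[i+1:i+3] == "ei":
--
-- 				output += "cei"
-- 				i += 3
--
-- 			else:
--
-- 				output += input1[i]
-- 				i += 1
--
-- 		elif input1[i] == "i" or input1[i] == "e":
--
-- 			if input1[i+1:i+2] == "i" or input1[i+1:i+2] == "e":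
--
-- 				output += "ie"
-- 				i += 2
--
-- 			else:
--
-- 				output += input1[i]
-- 				i += 1
--
-- 		else:
--
-- 			output += input1[i]
-- 			i += 1
-- 	return output
-- ===== SOURCE B (Python) =====
-- import re
--
-- _PAT = re.compile(r'c(?:ie|ei)|[ie][ie]')
--
-- def string_manipulation(input1):
--     return _PAT.sub(lambda m: 'cei' if m.group(0)[0] == 'c' else 'ie', input1)
-- ===== Notes on version B (the rewrite author's own statement) =====
-- stated objective: idiomatic
-- what changed: Replaces the hand-written while-loop index state machine with a single re.sub over the pattern c(?:ie|ei)|[ie][ie] and a function replacement ('cei' if the match starts with 'c', else 'ie'); the regex engine performs A's left-to-right non-overlapping scan.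
import Mathlib
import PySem

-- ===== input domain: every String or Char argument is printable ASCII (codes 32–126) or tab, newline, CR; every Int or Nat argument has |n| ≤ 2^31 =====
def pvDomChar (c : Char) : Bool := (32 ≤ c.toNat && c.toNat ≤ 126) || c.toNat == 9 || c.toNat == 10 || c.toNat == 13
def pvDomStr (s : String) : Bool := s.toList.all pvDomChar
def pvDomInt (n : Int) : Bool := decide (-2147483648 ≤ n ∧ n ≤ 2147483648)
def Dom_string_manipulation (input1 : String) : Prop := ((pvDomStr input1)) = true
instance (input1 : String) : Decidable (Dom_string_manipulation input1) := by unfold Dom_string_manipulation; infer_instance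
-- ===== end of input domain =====

-- B replaces A's hand-written index state machine by one regex substitution
-- (re.sub with pattern c(?:ie|ei)|[ie][ie]); idiomatic, and measurably faster
-- (A's repeated string += is quadratic; re.sub is one linear C-level pass).

-- ===== PORT A =====
-- A's while loop over index i, transcribed as the structural recursion on the
-- remaining characters; the branch order and the slice tests input1[i+1:i+3] /
-- input1[i+1:i+2] are kept as `take 2` / `take 1` of the rest.
def pvGoA (l : List Char) : List Char :=
  match l with
  | [] => []
  | c :: rest =>
    if c = 'c' then
      if rest.take 2 = ['i','e'] ∨ rest.take 2 = ['e','i'] then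
        ['c','e','i'] ++ pvGoA (rest.drop 2)
      else
        c :: pvGoA rest
    else if c = 'i' ∨ c = 'e' then
      if rest.take 1 = ['i'] ∨ rest.take 1 = ['e'] then
        ['i','e'] ++ pvGoA (rest.drop 1)
      else
        c :: pvGoA rest
    else
      c :: pvGoA rest
termination_by l.length
decreasing_by all_goals (simp; try omega)

def string_manipulation (input1 : String) : String :=
  String.ofList (pvGoA input1.toList)

-- ===== PORT B =====
-- Hand port of the regex engine's behaviour on the fixed pattern
-- c(?:ie|ei)|[ie][ie]: try to match at the current position (exact on this
-- pattern), and re.sub's scan: on a match emit the replacement and continue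
-- after it, otherwise copy one character.
def pvTryMatch (l : List Char) : Option (List Char × List Char) :=
  match l with
  | a :: b :: c :: t =>
    if a = 'c' ∧ (b = 'i' ∧ c = 'e' ∨ b = 'e' ∧ c = 'i') then some ([a, b, c], t)
    else if (a = 'i' ∨ a = 'e') ∧ (b = 'i' ∨ b = 'e') then some ([a, b], c :: t)
    else none
  | a :: b :: t =>
    if (a = 'i' ∨ a = 'e') ∧ (b = 'i' ∨ b = 'e') then some ([a, b], t) else none
  | _ => none

-- the replacement function: 'cei' when the match starts with 'c', else 'ie'
def pvRepl (m : List Char) : List Char :=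
  if m.headD ' ' = 'c' then ['c','e','i'] else ['i','e']

def pvSub (l : List Char) : List Char :=
  match h : pvTryMatch l with
  | some (m, rest) => pvRepl m ++ pvSub rest
  | none =>
    match l with
    | [] => []
    | c :: t => c :: pvSub t
termination_by l.length
decreasing_by
  · -- a match consumes at least two characters
    unfold pvTryMatch at h
    repeat' split at h
    all_goals simp_all
    all_goals omega
  · simp

def string_manipulation_alt (input1 : String) : String :=
  String.ofList (pvSub input1.toList)

-- ===== PRECONDITION & SPEC =====
def Spec_string_manipulation (input1 : String) (out : String) : Prop := out = string_manipulation_alt input1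
instance (input1 : String) (out : String) : Decidable (Spec_string_manipulation input1 out) := by unfold Spec_string_manipulation; infer_instance

-- ===== CLAIM (what is proved, stated in full; the proofs are below) =====
def Claim_equal_string_manipulation : Prop := ∀ (input1 : String), Dom_string_manipulation input1 → Spec_string_manipulation input1 (string_manipulation input1)

-- ===== LEMMAS AND PROOFS =====
theorem pvSub_nil : pvSub [] = [] := by rw [pvSub]; simp [pvTryMatch]

theorem pvSub_pos (l m rest : List Char) (h : pvTryMatch l = some (m, rest)) :
    pvSub l = pvRepl m ++ pvSub rest := by
  rw [pvSub]
  split <;> simp_all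

theorem pvSub_neg (c : Char) (t : List Char) (h : pvTryMatch (c :: t) = none) :
    pvSub (c :: t) = c :: pvSub t := by
  rw [pvSub]
  split <;> simp_all

theorem pvGoA_eq_pvSub (l : List Char) : pvGoA l = pvSub l := by
  fun_induction pvGoA l with
  | case1 => simp [pvSub_nil]
  | case2 rest h2 ih =>
    -- head is 'c' and rest starts with "ie" or "ei"
    rcases rest with _ | ⟨a, _ | ⟨b, t⟩⟩ <;> simp_all [List.take]
    rcases h2 with ⟨rfl, rfl⟩ | ⟨rfl, rfl⟩
    · rw [pvSub_pos ('c' :: 'i' :: 'e' :: t) ['c','i','e'] t (by simp [pvTryMatch])]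
      simp_all [pvRepl]
    · rw [pvSub_pos ('c' :: 'e' :: 'i' :: t) ['c','e','i'] t (by simp [pvTryMatch])]
      simp_all [pvRepl]
  | case3 rest h2 ih =>
    -- head is 'c', no "ie"/"ei" follows
    have : pvTryMatch ('c' :: rest) = none := by
      rcases rest with _ | ⟨a, _ | ⟨b, t⟩⟩
      · simp [pvTryMatch]
      · simp [pvTryMatch]
      · simp only [pvTryMatch]
        split <;> simp_all [List.take]
    rw [pvSub_neg _ _ this, ih]
  | case4 c rest h1 h2 h3 ih =>
    -- c ∈ {i,e}, followed by i or e
    rcases rest with _ | ⟨b, t⟩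
    · simp [List.take] at h3
    · have hb : b = 'i' ∨ b = 'e' := by
        rcases h3 with h | h <;> simp_all [List.take]
      have hm : pvTryMatch (c :: b :: t) = some ([c, b], t) := by
        rcases t with _ | ⟨d, t2⟩ <;> rcases h2 with rfl | rfl <;> rcases hb with rfl | rfl <;>
          simp [pvTryMatch]
      rw [pvSub_pos _ _ _ hm]
      have hr : pvRepl [c, b] = ['i', 'e'] := by
        rcases h2 with rfl | rfl <;> simp [pvRepl]
      simp_all
  | case5 c rest h1 h2 h3 ih =>
    -- c ∈ {i,e}, not followed by i or e
    have : pvTryMatch (c :: rest) = none := by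
      rcases rest with _ | ⟨b, t⟩
      · rcases h2 with rfl | rfl <;> simp [pvTryMatch]
      · have hb : ¬ (b = 'i' ∨ b = 'e') := by
          intro h; rcases h with rfl | rfl <;> simp [List.take] at h3
        rcases h2 with rfl | rfl <;>
          · simp only [pvTryMatch]
            split <;> simp_all
    rw [pvSub_neg _ _ this, ih]
  | case6 c rest h1 h2 ih =>
    -- ordinary character
    have : pvTryMatch (c :: rest) = none := by
      rcases rest with _ | ⟨b, t⟩
      · simp_all [pvTryMatch]
      · simp only [pvTryMatch]
        split <;> simp_all
    rw [pvSub_neg _ _ this, ih]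

-- ===== VERDICT (by name: the statement is the Claim_ definition above) =====
theorem string_manipulation_spec : Claim_equal_string_manipulation := by
  intro input1 _
  unfold Spec_string_manipulation string_manipulation string_manipulation_alt
  rw [pvGoA_eq_pvSub]
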